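-- pv_equiv track=rewrite | github.com/cfebs/gmusicplaylistdupes | kill_dupes.py | sort_tracks_by_album
-- ===== SOURCE A (Python) =====
-- def sort_tracks_by_album(tracks):
--     tracks_by_album = {}
--     for track in tracks:
--         albumNorm = track['album'].lower()
--         if albumNorm not in tracks_by_album:
--             tracks_by_album[albumNorm] = []
--         tracks_by_album[albumNorm].append(track)
--     return tracks_by_album
-- ===== SOURCE B (Python) =====
-- def sort_tracks_by_album(tracks):
--     # two-pass grouping: collect distinct lowercased album names in first-occurrence
--     # order, then build each group with one filtering comprehension over the input
--     keys = []
--     for track in tracks: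
--         k = track['album'].lower()
--         if k not in keys:
--             keys.append(k)
--     return {k: [t for t in tracks if t['album'].lower() == k] for k in keys}
-- ===== Notes on version B (the rewrite author's own statement) =====
-- stated objective: alternative
-- what changed: replaces the single-pass dict accumulation (conditional empty-list insert then append) by a two-pass scheme: first collect the distinct lowercased album names in first-occurrence order, then build each group with a filtering comprehension over the whole input
import Mathlib
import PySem

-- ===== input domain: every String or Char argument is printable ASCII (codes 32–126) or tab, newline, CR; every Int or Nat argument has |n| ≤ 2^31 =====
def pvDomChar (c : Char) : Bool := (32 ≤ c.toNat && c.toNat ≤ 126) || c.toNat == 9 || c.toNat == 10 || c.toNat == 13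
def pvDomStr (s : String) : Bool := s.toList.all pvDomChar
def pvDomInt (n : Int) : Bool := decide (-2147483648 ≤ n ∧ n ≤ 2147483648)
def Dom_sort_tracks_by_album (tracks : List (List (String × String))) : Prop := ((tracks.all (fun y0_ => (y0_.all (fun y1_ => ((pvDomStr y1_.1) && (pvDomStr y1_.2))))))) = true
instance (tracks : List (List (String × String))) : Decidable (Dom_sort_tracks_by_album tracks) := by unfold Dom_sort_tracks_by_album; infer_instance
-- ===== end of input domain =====

-- B replaces A's single-pass dict accumulation by a two-pass scheme (distinct keys
-- first, then one filtering pass per key); alternative decomposition, not faster.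


-- track['album'].lower(); total form of the lookup, exact under Pre_ (key present)
def pvAlbumKey (t : List (String × String)) : String :=
  PySem.Str.lower ((PySem.Dict.mk t).getD "album" "")

-- ===== PORT A =====
def sort_tracks_by_album (tracks : List (List (String × String))) : List (String × List (List (String × String))) :=
  (tracks.foldl
    (fun d track =>
      let albumNorm := pvAlbumKey track
      let d := if d.contains albumNorm then d else d.insert albumNorm []
      d.modify albumNorm [] (fun l => l ++ [track]))
    PySem.Dict.empty).items

-- ===== PORT B =====
def sort_tracks_by_album_alt (tracks : List (List (String × String))) : List (String × List (List (String × String))) :=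
  let keys := tracks.foldl
    (fun ks track =>
      let k := pvAlbumKey track
      if k ∈ ks then ks else ks ++ [k]) []
  keys.map (fun k => (k, tracks.filter (fun t => pvAlbumKey t == k)))

-- ===== PRECONDITION & SPEC =====
-- Pre_ excludes only tracks missing the 'album' key, on which A raises KeyError.
def Pre_sort_tracks_by_album (tracks : List (List (String × String))) : Prop :=
  (tracks.all (fun t => (PySem.Dict.mk t).contains "album")) = true
instance (tracks : List (List (String × String))) : Decidable (Pre_sort_tracks_by_album tracks) := by unfold Pre_sort_tracks_by_album; infer_instance
def pvWitness_sort_tracks_by_album : (List (List (String × String))) :=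
  [[("album", "Abbey Road")], [("album", "abbey road")], [("album", "Help!")]]
def Spec_sort_tracks_by_album (tracks : List (List (String × String))) (out : List (String × List (List (String × String)))) : Prop := out = sort_tracks_by_album_alt tracks
instance (tracks : List (List (String × String))) (out : List (String × List (List (String × String)))) : Decidable (Spec_sort_tracks_by_album tracks out) := by unfold Spec_sort_tracks_by_album; infer_instance

-- ===== CLAIM (what is proved, stated in full; the proofs are below) =====
def Claim_equal_sort_tracks_by_album : Prop := ∀ (tracks : List (List (String × String))), Dom_sort_tracks_by_album tracks → Pre_sort_tracks_by_album tracks → Spec_sort_tracks_by_album tracks (sort_tracks_by_album tracks)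

-- ===== LEMMAS AND PROOFS =====

-- A's loop body (conditional empty insert, then append) is a single dict.modify
theorem pv_step_eq (d : PySem.Dict String (List (List (String × String)))) (k : String)
    (t : List (String × String)) :
    (if d.contains k then d else d.insert k []).modify k [] (fun l => l ++ [t])
      = d.modify k [] (fun l => l ++ [t]) := by
  by_cases h : d.contains k
  · simp [h]
  · have hd : d.getD k ([] : List (List (String × String))) = [] :=
      PySem.Dict.getD_of_not_contains _ _ (by simpa using h)
    simp [h, PySem.Dict.modify, PySem.Dict.getD_insert_self,
      PySem.Dict.insert_insert_self, hd]

-- each group in A's dict is the filter of the whole input by that key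
theorem pv_getD (tracks : List (List (String × String))) (k : String) :
    (tracks.foldl (fun d t => d.modify (pvAlbumKey t) [] (fun l => l ++ [t]))
      PySem.Dict.empty).getD k []
      = tracks.filter (fun t => pvAlbumKey t == k) := by
  have h := List.foldl_map (f := fun t : List (String × String) => (pvAlbumKey t, t))
    (g := fun (d : PySem.Dict String (List (List (String × String)))) p =>
      d.modify p.1 [] (fun l => l ++ [p.2]))
    (l := tracks) (init := PySem.Dict.empty)
  rw [← h, PySem.Dict.getD_foldl_modify_append, PySem.Dict.getD_empty,
    List.nil_append, List.filter_map, List.map_map]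
  simp [Function.comp_def]

theorem pv_main (tracks : List (List (String × String))) :
    sort_tracks_by_album tracks = sort_tracks_by_album_alt tracks := by
  unfold sort_tracks_by_album sort_tracks_by_album_alt
  simp only [pv_step_eq]
  have hbkeys : tracks.foldl (fun ks track =>
      let k := pvAlbumKey track
      if k ∈ ks then ks else ks ++ [k]) []
      = PySem.Set.ofList (tracks.map pvAlbumKey) := by
    rw [← PySem.Set.update_nil_left, PySem.Set.update_map_eq_foldl_add]
    congr 1
    funext s t
    simp [PySem.Set.add_eq_ite]
  have hnd : (tracks.foldl (fun d t => d.modify (pvAlbumKey t) [] (fun l => l ++ [t]))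
      PySem.Dict.empty).keys.Nodup :=
    PySem.Dict.nodup_keys_foldl_modify_key _ _ _ _ _ (by simp [PySem.Dict.keys_empty])
  have hkeys : (tracks.foldl (fun d t => d.modify (pvAlbumKey t) [] (fun l => l ++ [t]))
      PySem.Dict.empty).keys = PySem.Set.ofList (tracks.map pvAlbumKey) := by
    rw [PySem.Dict.keys_foldl_modify_key]
    simp [PySem.Dict.keys_empty, PySem.Set.update_nil_left]
  rw [PySem.Dict.items_eq_map_keys _ hnd [], hkeys, hbkeys]
  exact List.map_congr_left (fun k _ => by rw [pv_getD])

-- ===== VERDICT (by name: the statement is the Claim_ definition above) =====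
theorem sort_tracks_by_album_spec : Claim_equal_sort_tracks_by_album := by
  intro tracks _ _
  exact pv_main tracks
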